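-- pv_equiv track=rewrite | github.com/yfchenggithub/mathnote | scripts/fix_math_punctuation.py | split_csv_tokens
-- ===== SOURCE A (Python) =====
-- def split_csv_tokens(values: list[str]) -> list[str]:
--     tokens: list[str] = []
--     for raw in values:
--         for token in raw.split(","):
--             piece = token.strip()
--             if piece:
--                 tokens.append(piece)
--     return tokens
-- ===== SOURCE B (Python) =====
-- def split_csv_tokens(values: list[str]) -> list[str]:
--     # Single character-level scan with an explicit buffer: no str.split at all.
--     tokens: list[str] = []
--     buf: list[str] = []
--
--     def flush() -> None:
--         piece = "".join(buf).strip()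
--         if piece:
--             tokens.append(piece)
--         buf.clear()
--
--     for raw in values:
--         for ch in raw:
--             if ch == ",":
--                 flush()
--             else:
--                 buf.append(ch)
--         flush()
--     return tokens
-- ===== Notes on version B (the rewrite author's own statement) =====
-- stated objective: alternative
-- what changed: Replaces the nested split-then-strip loops by a single character-level state machine that scans each string char by char, accumulating a buffer and flushing a stripped token at every comma and string boundary.
import Mathlib
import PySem

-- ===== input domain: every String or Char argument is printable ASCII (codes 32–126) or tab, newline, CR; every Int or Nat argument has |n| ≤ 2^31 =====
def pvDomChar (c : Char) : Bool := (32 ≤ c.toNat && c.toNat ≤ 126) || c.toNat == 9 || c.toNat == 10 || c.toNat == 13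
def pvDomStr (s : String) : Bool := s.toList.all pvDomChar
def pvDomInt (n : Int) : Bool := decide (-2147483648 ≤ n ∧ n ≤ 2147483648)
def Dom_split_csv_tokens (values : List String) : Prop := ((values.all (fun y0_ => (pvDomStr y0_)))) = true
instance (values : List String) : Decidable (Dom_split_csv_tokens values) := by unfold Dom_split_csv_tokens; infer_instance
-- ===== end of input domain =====

-- B replaces A's nested split/strip loops by a single character-level state machine
-- with an explicit buffer, flushed at commas and string boundaries (objective: alternative).

-- ===== PORT A =====
def split_csv_tokens (values : List String) : List String :=
  values.foldl (fun tokens raw =>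
    ((PySem.Str.split? raw ",").getD []).foldl (fun tokens token =>
      let piece := PySem.Str.strip token
      if piece ≠ "" then tokens ++ [piece] else tokens) tokens) []

-- ===== PORT B =====
-- flush(): strip the joined buffer, append if non-empty, clear the buffer
def pvFlush (tokens : List String) (buf : List Char) : List String :=
  let piece := PySem.Str.strip (String.ofList buf)
  if piece ≠ "" then tokens ++ [piece] else tokens

-- one character step of B's scan: on ',' flush, otherwise append to the buffer
def pvStep (st : List String × List Char) (ch : Char) : List String × List Char :=
  if ch = ',' then (pvFlush st.1 st.2, []) else (st.1, st.2 ++ [ch])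

def split_csv_tokens_alt (values : List String) : List String :=
  (values.foldl (fun st raw =>
      let st2 := raw.toList.foldl pvStep st
      (pvFlush st2.1 st2.2, ([] : List Char)))
    (([], []) : List String × List Char)).1

-- ===== PRECONDITION & SPEC =====
def Spec_split_csv_tokens (values : List String) (out : List String) : Prop := out = split_csv_tokens_alt values
instance (values : List String) (out : List String) : Decidable (Spec_split_csv_tokens values out) := by unfold Spec_split_csv_tokens; infer_instance

-- ===== CLAIM (what is proved, stated in full; the proofs are below) =====
def Claim_equal_split_csv_tokens : Prop := ∀ (values : List String), Dom_split_csv_tokens values → Spec_split_csv_tokens values (split_csv_tokens values)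

-- ===== LEMMAS AND PROOFS =====

-- proof-side model of splitting a char list on ','
def pvConsHead (p : List Char) : List (List Char) → List (List Char)
  | [] => [p]
  | x :: xs => (p ++ x) :: xs

def pvSplit : List Char → List (List Char)
  | [] => [[]]
  | c :: rest => if c = ',' then [] :: pvSplit rest else pvConsHead [c] (pvSplit rest)

theorem pvSplit_ne_nil (l : List Char) : pvSplit l ≠ [] := by
  cases l with
  | nil => simp [pvSplit]
  | cons c rest =>
    simp only [pvSplit]
    split
    · simp
    · cases h : pvSplit rest <;> simp [pvConsHead]

theorem pvConsHead_nil (xs : List (List Char)) (h : xs ≠ []) : pvConsHead [] xs = xs := by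
  cases xs with
  | nil => exact absurd rfl h
  | cons x xs => simp [pvConsHead]

theorem pvConsHead_consHead (a b : List Char) (xs : List (List Char)) :
    pvConsHead a (pvConsHead b xs) = pvConsHead (a ++ b) xs := by
  cases xs <;> simp [pvConsHead]

theorem pvConsHead_append (a : List Char) (xs ys : List (List Char)) (h : xs ≠ []) :
    pvConsHead a (xs ++ ys) = pvConsHead a xs ++ ys := by
  cases xs with
  | nil => exact absurd rfl h
  | cons x xs => simp [pvConsHead]

theorem pv_go_spec (fuel : Nat) (l cur : List Char) (acc : List (List Char))
    (hf : l.length < fuel) :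
    PySem.Chars.splitOn.go [','] fuel l cur acc
      = acc.reverse ++ pvConsHead cur.reverse (pvSplit l) := by
  induction fuel generalizing l cur acc with
  | zero => omega
  | succ fuel ih =>
    cases l with
    | nil =>
      simp [PySem.Chars.splitOn.go, pvSplit, pvConsHead]
    | cons c rest =>
      by_cases hc : c = ','
      · subst hc
        rw [show PySem.Chars.splitOn.go [','] (fuel+1) (',' :: rest) cur acc
              = PySem.Chars.splitOn.go [','] fuel rest [] (cur.reverse :: acc) by
            simp [PySem.Chars.splitOn.go, List.isPrefixOf]]
        rw [ih rest [] (cur.reverse :: acc) (by simpa using Nat.lt_of_succ_lt_succ hf)]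
        simp only [List.reverse_nil, pvConsHead_nil _ (pvSplit_ne_nil rest)]
        simp [pvSplit, pvConsHead]
      · rw [show PySem.Chars.splitOn.go [','] (fuel+1) (c :: rest) cur acc
              = PySem.Chars.splitOn.go [','] fuel rest (c :: cur) acc by
            simp [PySem.Chars.splitOn.go, List.isPrefixOf, Ne.symm hc]]
        rw [ih rest (c :: cur) acc (by simpa using Nat.lt_of_succ_lt_succ hf)]
        simp [pvSplit, hc, pvConsHead_consHead]

theorem pv_splitOn_comma (s : List Char) : PySem.Chars.splitOn s [','] = pvSplit s := by
  rw [PySem.Chars.splitOn, pv_go_spec _ _ _ _ (by omega)]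
  simp [pvConsHead_nil _ (pvSplit_ne_nil s)]

theorem pvSplit_append (s t : List Char) :
    pvSplit (s ++ ',' :: t) = pvSplit s ++ pvSplit t := by
  induction s with
  | nil => simp [pvSplit]
  | cons c s ih =>
    by_cases hc : c = ','
    · subst hc; simp [pvSplit, ih]
    · simp [pvSplit, hc, ih, pvConsHead_append _ _ _ (pvSplit_ne_nil s)]

theorem pvSplit_nocomma (s : List Char) (h : ',' ∉ s) : pvSplit s = [s] := by
  induction s with
  | nil => rfl
  | cons c s ih =>
    simp only [List.mem_cons, not_or] at h
    simp [pvSplit, Ne.symm h.1, ih h.2, pvConsHead]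

-- the per-chunk token extraction, at the char level
def pvTok (cs : List Char) : List (List Char) :=
  ((pvSplit cs).map PySem.Chars.strip).filter (fun p => p ≠ [])

theorem pv_strip_ofList (cs : List Char) :
    PySem.Str.strip (String.ofList cs) = String.ofList (PySem.Chars.strip cs) := by
  simp [PySem.Str.strip, String.toList_ofList]

theorem pv_ofList_ne_empty (cs : List Char) :
    (String.ofList cs ≠ "") ↔ cs ≠ [] := by
  constructor
  · intro h hc; exact h (by simp [hc])
  · intro h hc
    exact h (by simpa using congrArg String.toList hc)

theorem pv_map_tok (xs : List (List Char)) :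
    List.map PySem.Str.strip
        (List.filter (fun token => decide (PySem.Str.strip token ≠ "")) (xs.map String.ofList))
      = (List.filter (fun p => decide (p ≠ [])) (xs.map PySem.Chars.strip)).map String.ofList := by
  induction xs with
  | nil => simp
  | cons c xs ih =>
    simp only [List.map_cons, List.filter_cons]
    by_cases h : PySem.Chars.strip c = []
    · have h1 : PySem.Str.strip (String.ofList c) = "" := by
        rw [pv_strip_ofList, h]
      simp [h1, h]
      simpa using ih
    · have h1 : PySem.Str.strip (String.ofList c) ≠ "" := by
        rw [pv_strip_ofList]; exact (pv_ofList_ne_empty _).mpr h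
      simp [h, pv_strip_ofList]
      simpa using ih

-- A's result, chunk list → flatMap of per-chunk tokens (String level)
theorem pv_str_tok (raw : String) (acc : List String) :
    ((PySem.Str.split? raw ",").getD []).foldl (fun tokens token =>
        let piece := PySem.Str.strip token
        if piece ≠ "" then tokens ++ [piece] else tokens) acc
      = acc ++ (pvTok raw.toList).map String.ofList := by
  have hsplit : (PySem.Str.split? raw ",").getD []
      = (pvSplit raw.toList).map String.ofList := by
    simp [PySem.Str.split?, PySem.Chars.split?, pv_splitOn_comma]
  rw [hsplit]
  have h := PySem.List.foldl_append_if
      (fun token => decide (PySem.Str.strip token ≠ "")) PySem.Str.strip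
      ((pvSplit raw.toList).map String.ofList) acc
  simp only [decide_eq_true_eq] at h
  rw [h]
  rw [pv_map_tok]
  rfl

theorem pv_a_eq (values : List String) (init : List String) :
    values.foldl (fun tokens raw =>
      ((PySem.Str.split? raw ",").getD []).foldl (fun tokens token =>
        let piece := PySem.Str.strip token
        if piece ≠ "" then tokens ++ [piece] else tokens) tokens) init
      = init ++ values.flatMap (fun raw => (pvTok raw.toList).map String.ofList) := by
  induction values generalizing init with
  | nil => simp
  | cons v vs ih => rw [List.foldl_cons, pv_str_tok, ih]; simp

-- B side: flush on a comma-free buffer is exactly the per-chunk token extraction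
theorem pv_flush_eq (tokens : List String) (buf : List Char) (h : ',' ∉ buf) :
    pvFlush tokens buf = tokens ++ (pvTok buf).map String.ofList := by
  unfold pvFlush pvTok
  rw [pvSplit_nocomma buf h]
  by_cases hb : PySem.Chars.strip buf = []
  · simp [pv_strip_ofList, hb]
  · simp [pv_strip_ofList, hb, (pv_ofList_ne_empty _).mpr hb]

-- B's scan over l starting with buffer buf, then flush, yields the tokens of buf ++ l
theorem pv_scan (l : List Char) (buf : List Char) (tokens : List String) (h : ',' ∉ buf) :
    (fun st2 => pvFlush st2.1 st2.2) (l.foldl pvStep (tokens, buf))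
      = tokens ++ (pvTok (buf ++ l)).map String.ofList := by
  induction l generalizing buf tokens with
  | nil => simpa using pv_flush_eq tokens buf h
  | cons c l ih =>
    by_cases hc : c = ','
    · subst hc
      rw [List.foldl_cons, show pvStep (tokens, buf) ',' = (pvFlush tokens buf, []) by
        simp [pvStep]]
      rw [ih [] (pvFlush tokens buf) (by simp)]
      rw [pv_flush_eq tokens buf h]
      have : buf ++ ',' :: l = buf ++ [','] ++ l := by simp
      rw [this]
      unfold pvTok
      rw [show buf ++ [','] ++ l = buf ++ ',' :: l by simp, pvSplit_append]
      simp [List.filter_append]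
    · rw [List.foldl_cons, show pvStep (tokens, buf) c = (tokens, buf ++ [c]) by
        simp [pvStep, hc]]
      rw [ih (buf ++ [c]) tokens (by simp [h, Ne.symm hc])]
      simp

-- B's outer fold, tokens accumulated so far and an empty buffer
theorem pv_alt_fold (values : List String) (tokens : List String) :
    (values.foldl (fun st raw =>
        let st2 := raw.toList.foldl pvStep st
        (pvFlush st2.1 st2.2, ([] : List Char)))
      (tokens, ([] : List Char))).1
      = tokens ++ values.flatMap (fun raw => (pvTok raw.toList).map String.ofList) := by
  induction values generalizing tokens with
  | nil => simp
  | cons v vs ih =>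
    rw [List.foldl_cons]
    have h := pv_scan v.toList [] tokens (by simp)
    simp only at h
    simp only [h, List.nil_append]
    rw [ih]
    simp

-- ===== VERDICT (by name: the statement is the Claim_ definition above) =====
theorem split_csv_tokens_spec : Claim_equal_split_csv_tokens := by
  intro values _
  unfold Spec_split_csv_tokens split_csv_tokens split_csv_tokens_alt
  rw [pv_a_eq, pv_alt_fold, List.nil_append]
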